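-- pv_equiv track=rewrite | github.com/Bigsby/aoc | 2019/day_01/py/run.py | getFuel
-- ===== SOURCE A (Python) =====
-- def getFuel(mass: int) -> int:
--     total = 0
--     currentMass = mass
--     while True:
--         fuel = currentMass // 3 - 2
--         if fuel <= 0:
--             break
--         total += fuel
--         currentMass = fuel
--     return total
-- ===== SOURCE B (Python) =====
-- def getFuel(mass: int) -> int:
--     fuel = mass // 3 - 2
--     if fuel <= 0:
--         return 0
--     return fuel + getFuel(fuel)
-- ===== Notes on version B (the rewrite author's own statement) =====
-- stated objective: simpler
-- what changed: Replaced the iterative while-loop with an explicit running total by a direct recursion on the fuel recurrence with no accumulator.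
import Mathlib
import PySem

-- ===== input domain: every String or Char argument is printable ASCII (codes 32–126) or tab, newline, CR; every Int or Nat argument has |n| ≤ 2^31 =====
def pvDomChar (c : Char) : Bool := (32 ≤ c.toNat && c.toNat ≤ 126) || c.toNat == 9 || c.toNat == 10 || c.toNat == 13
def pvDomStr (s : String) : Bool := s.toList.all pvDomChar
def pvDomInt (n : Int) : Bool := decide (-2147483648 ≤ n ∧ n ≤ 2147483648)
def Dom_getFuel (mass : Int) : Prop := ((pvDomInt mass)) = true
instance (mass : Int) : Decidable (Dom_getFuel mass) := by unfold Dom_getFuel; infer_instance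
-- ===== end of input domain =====

-- B is a direct recursion on the fuel recurrence (no accumulator); same values, simpler shape.

-- the loop/recursion steps strictly decrease the (nonneg part of the) mass
theorem pvFuel_lt (m : Int) (h : ¬ PySem.Int.floordiv m 3 - 2 ≤ 0) :
    (PySem.Int.floordiv m 3 - 2).toNat < m.toNat := by
  have h3 : (0:Int) < 3 := by omega
  rw [PySem.Int.floordiv_eq_ediv_of_pos h3] at *
  omega

-- ===== PORT A =====
-- while-loop of A: state (currentMass, total)
def getFuelLoop (currentMass : Int) (total : Int) : Int :=
  let fuel := PySem.Int.floordiv currentMass 3 - 2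
  if fuel ≤ 0 then total
  else getFuelLoop fuel (total + fuel)
termination_by currentMass.toNat
decreasing_by exact pvFuel_lt currentMass (by assumption)

def getFuel (mass : Int) : Int := getFuelLoop mass 0

-- ===== PORT B =====
def getFuel_alt (mass : Int) : Int :=
  let fuel := PySem.Int.floordiv mass 3 - 2
  if fuel ≤ 0 then 0
  else fuel + getFuel_alt fuel
termination_by mass.toNat
decreasing_by exact pvFuel_lt mass (by assumption)

-- ===== PRECONDITION & SPEC =====
def Spec_getFuel (mass : Int) (out : Int) : Prop := out = getFuel_alt mass
instance (mass : Int) (out : Int) : Decidable (Spec_getFuel mass out) := by unfold Spec_getFuel; infer_instance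

-- ===== CLAIM (what is proved, stated in full; the proofs are below) =====
def Claim_equal_getFuel : Prop := ∀ (mass : Int), Dom_getFuel mass → Spec_getFuel mass (getFuel mass)

-- ===== LEMMAS AND PROOFS =====
theorem getFuelLoop_eq (currentMass total : Int) :
    getFuelLoop currentMass total = total + getFuel_alt currentMass := by
  induction currentMass, total using getFuelLoop.induct with
  | case1 m t fuel hle =>
      rw [getFuelLoop, getFuel_alt]
      have hle' : PySem.Int.floordiv m 3 - 2 ≤ 0 := hle
      rw [if_pos hle', if_pos hle']
      omega
  | case2 m t fuel hle ih =>
      rw [getFuelLoop, getFuel_alt]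
      have hle' : ¬ PySem.Int.floordiv m 3 - 2 ≤ 0 := hle
      rw [if_neg hle', if_neg hle']
      rw [ih]
      ring

-- ===== VERDICT (by name: the statement is the Claim_ definition above) =====
theorem getFuel_spec : Claim_equal_getFuel := by
  intro mass _
  unfold Spec_getFuel getFuel
  rw [getFuelLoop_eq]
  ring
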